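-- pv_equiv track=rewrite | github.com/worknonstop/python-project-50 | gendiff/generate_diff.py | get_diff_dict
-- ===== SOURCE A (Python) =====
-- def get_diff_dict(dict1, dict2):
--     keys = set(dict1) | set(dict2)
--     sorted_keys = list(sorted(keys))
--     new_dict = {}
--     for key in sorted_keys:
--         if key in dict1 and key in dict2:
--             if dict1[key] == dict2[key]:
--                 new_dict["   " + key] = dict1[key]
--             elif dict1[key] != dict2[key]:
--                 new_dict[" - " + key] = dict1[key]
--                 new_dict[" + " + key] = dict2[key]
--         elif key in dict1 or key in dict2:
--             if key in dict1:
--                 new_dict[" - " + key] = dict1[key]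
--             elif key in dict2:
--                 new_dict[" + " + key] = dict2[key]
--     return new_dict
-- ===== SOURCE B (Python) =====
-- def get_diff_dict(dict1, dict2):
--     removed = set(dict1) - set(dict2)
--     added = set(dict2) - set(dict1)
--     common = set(dict1) & set(dict2)
--     entries = []
--     for key in removed:
--         entries.append((key, [(" - " + key, dict1[key])]))
--     for key in added:
--         entries.append((key, [(" + " + key, dict2[key])]))
--     for key in common:
--         if dict1[key] == dict2[key]:
--             entries.append((key, [("   " + key, dict1[key])]))
--         else:
--             entries.append((key, [(" - " + key, dict1[key]),
--                                   (" + " + key, dict2[key])]))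
--     entries.sort(key=lambda e: e[0])
--     return {pk: v for _, group in entries for pk, v in group}
-- ===== Notes on version B (the rewrite author's own statement) =====
-- stated objective: alternative
-- what changed: Instead of one pass over the sorted union of keys with per-key membership tests, B partitions the keys up front with set algebra (removed/added/common), emits tagged (raw key, group) entries in three passes, stably sorts the entries by the raw key, and builds the result dict by one flat pass.
import Mathlib
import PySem

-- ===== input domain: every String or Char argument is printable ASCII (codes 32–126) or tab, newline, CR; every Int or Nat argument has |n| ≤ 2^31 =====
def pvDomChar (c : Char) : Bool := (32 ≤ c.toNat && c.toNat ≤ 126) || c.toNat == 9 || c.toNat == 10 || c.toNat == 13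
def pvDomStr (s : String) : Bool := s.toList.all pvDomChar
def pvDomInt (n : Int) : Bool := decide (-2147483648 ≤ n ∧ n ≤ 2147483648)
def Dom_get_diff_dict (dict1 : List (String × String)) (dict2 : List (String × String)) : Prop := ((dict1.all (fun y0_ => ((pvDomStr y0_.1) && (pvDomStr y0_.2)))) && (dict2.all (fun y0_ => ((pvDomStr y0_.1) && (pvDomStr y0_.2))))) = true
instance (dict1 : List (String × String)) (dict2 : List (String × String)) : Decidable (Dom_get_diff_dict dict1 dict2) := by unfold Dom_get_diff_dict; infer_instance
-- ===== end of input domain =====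

-- B re-implements A by a different decomposition: set-algebra partition of the keys (removed /
-- added / common), three emission passes producing tagged (raw key, group) entries, one stable
-- sort by the raw key, then one flat dict build (objective: alternative; same asymptotic cost).

-- Python '+' on str (both Source A and Source B prefix keys with it); exact: concatenation of the character lists.
def pyStrAdd (a b : String) : String := String.ofList (a.toList ++ b.toList)

-- ===== PORT A =====
def get_diff_dict (dict1 : List (String × String)) (dict2 : List (String × String)) : List (String × String) :=
  let d1 : PySem.Dict String String := PySem.Dict.mk dict1
  let d2 : PySem.Dict String String := PySem.Dict.mk dict2
  let keys : PySem.Set String := PySem.Set.union (PySem.Set.ofList d1.keys) (PySem.Set.ofList d2.keys)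
  let sorted_keys := PySem.List.sorted keys (fun k => k) false
  let new_dict := sorted_keys.foldl (fun (nd : PySem.Dict String String) key =>
    if d1.contains key && d2.contains key then
      if d1.getD key "" == d2.getD key "" then
        nd.insert (pyStrAdd "   " key) (d1.getD key "")
      else
        (nd.insert (pyStrAdd " - " key) (d1.getD key "")).insert (pyStrAdd " + " key) (d2.getD key "")
    else if d1.contains key || d2.contains key then
      if d1.contains key then
        nd.insert (pyStrAdd " - " key) (d1.getD key "")
      else if d2.contains key then
        nd.insert (pyStrAdd " + " key) (d2.getD key "")
      else nd
    else nd) PySem.Dict.empty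
  new_dict.items

-- ===== PORT B =====
def get_diff_dict_alt (dict1 : List (String × String)) (dict2 : List (String × String)) : List (String × String) :=
  let d1 : PySem.Dict String String := PySem.Dict.mk dict1
  let d2 : PySem.Dict String String := PySem.Dict.mk dict2
  let k1 : PySem.Set String := PySem.Set.ofList d1.keys
  let k2 : PySem.Set String := PySem.Set.ofList d2.keys
  let removed := PySem.Set.diff k1 k2
  let added := PySem.Set.diff k2 k1
  let common := PySem.Set.inter k1 k2
  let entries : List (String × List (String × String)) :=
    ((removed.foldl (fun acc key => acc ++ [(key, [(pyStrAdd " - " key, d1.getD key "")])]) []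
      |> added.foldl (fun acc key => acc ++ [(key, [(pyStrAdd " + " key, d2.getD key "")])]))
      |> common.foldl (fun acc key => acc ++
          [if d1.getD key "" == d2.getD key "" then
            (key, [(pyStrAdd "   " key, d1.getD key "")])
          else
            (key, [(pyStrAdd " - " key, d1.getD key ""), (pyStrAdd " + " key, d2.getD key "")])]))
  let es := PySem.List.sorted entries (fun e => e.1) false
  (es.foldl (fun (d : PySem.Dict String String) e =>
      e.2.foldl (fun (d : PySem.Dict String String) p => d.insert p.1 p.2) d) PySem.Dict.empty).items

-- ===== PRECONDITION & SPEC =====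
def Spec_get_diff_dict (dict1 : List (String × String)) (dict2 : List (String × String)) (out : List (String × String)) : Prop := out = get_diff_dict_alt dict1 dict2
instance (dict1 : List (String × String)) (dict2 : List (String × String)) (out : List (String × String)) : Decidable (Spec_get_diff_dict dict1 dict2 out) := by unfold Spec_get_diff_dict; infer_instance

-- ===== CLAIM (what is proved, stated in full; the proofs are below) =====
def Claim_equal_get_diff_dict : Prop := ∀ (dict1 : List (String × String)) (dict2 : List (String × String)), Dom_get_diff_dict dict1 dict2 → Spec_get_diff_dict dict1 dict2 (get_diff_dict dict1 dict2)

-- ===== LEMMAS AND PROOFS =====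

-- the per-key diff group both programs emit
def grp (dict1 dict2 : List (String × String)) (k : String) : List (String × String) :=
  let d1 : PySem.Dict String String := PySem.Dict.mk dict1
  let d2 : PySem.Dict String String := PySem.Dict.mk dict2
  if k ∈ dict1.map Prod.fst then
    if k ∈ dict2.map Prod.fst then
      if d1.getD k "" == d2.getD k "" then [(pyStrAdd "   " k, d1.getD k "")]
      else [(pyStrAdd " - " k, d1.getD k ""), (pyStrAdd " + " k, d2.getD k "")]
    else [(pyStrAdd " - " k, d1.getD k "")]
  else
    if k ∈ dict2.map Prod.fst then [(pyStrAdd " + " k, d2.getD k "")]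
    else []

theorem drop3_grp (dict1 dict2 : List (String × String)) (k : String) :
    ∀ p ∈ grp dict1 dict2 k, p.1.toList.drop 3 = k.toList := by
  intro p hp
  unfold grp at hp
  simp only at hp
  split_ifs at hp <;> simp_all [pyStrAdd, String.toList_ofList] <;>
    rcases hp with h | h <;> simp [h]

theorem nodup_grp_keys (dict1 dict2 : List (String × String)) (k : String) :
    ((grp dict1 dict2 k).map Prod.fst).Nodup := by
  unfold grp
  simp only
  split_ifs <;> simp [pyStrAdd] <;>
    (intro h; have h2 := congrArg String.toList h; simp at h2)

theorem string_toList_inj {a b : String} (h : a.toList = b.toList) : a = b := by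
  have := congrArg String.ofList h
  simpa using this

theorem nodup_flat_grp (dict1 dict2 : List (String × String)) (ks : List String) (hks : ks.Nodup) :
    (ks.flatMap (fun k => (grp dict1 dict2 k).map Prod.fst)).Nodup := by
  rw [List.nodup_flatMap]
  refine ⟨fun k _ => nodup_grp_keys dict1 dict2 k, ?_⟩
  refine hks.imp ?_
  intro a b hab s hsa hsb
  obtain ⟨p, hp, hpe⟩ := List.mem_map.1 hsa
  obtain ⟨q, hq, hqe⟩ := List.mem_map.1 hsb
  have h1 := drop3_grp dict1 dict2 a p hp
  have h2 := drop3_grp dict1 dict2 b q hq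
  apply hab
  apply string_toList_inj
  rw [← h1, ← h2, hpe, hqe]

theorem items_foldA (dict1 dict2 : List (String × String)) (ks : List String)
    (d : PySem.Dict String String)
    (hfresh : ∀ k ∈ ks, ∀ p ∈ grp dict1 dict2 k, d.contains p.1 = false)
    (hnd : (ks.flatMap fun k => (grp dict1 dict2 k).map Prod.fst).Nodup) :
    (ks.foldl (fun d k => (grp dict1 dict2 k).foldl (fun d p => d.insert p.1 p.2) d) d).items
      = d.items ++ ks.flatMap (grp dict1 dict2) := by
  induction ks generalizing d with
  | nil => simp
  | cons k ks ih =>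
    simp only [List.foldl_cons, List.flatMap_cons] at *
    have hfreshk : ∀ p ∈ grp dict1 dict2 k, d.contains p.1 = false :=
      fun p hp => hfresh k (by simp) p hp
    have hitems : ((grp dict1 dict2 k).foldl (fun d p => d.insert p.1 p.2) d).items
        = d.items ++ grp dict1 dict2 k := by
      have := PySem.Dict.items_foldl_insert_fresh (grp dict1 dict2 k) Prod.fst Prod.snd d
        hfreshk (nodup_grp_keys dict1 dict2 k)
      simpa using this
    have hkeys : ((grp dict1 dict2 k).foldl (fun d p => d.insert p.1 p.2) d).keys
        = d.keys ++ (grp dict1 dict2 k).map Prod.fst := by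
      simp only [PySem.Dict.keys, hitems, List.map_append]
    have hdisj : List.Disjoint ((grp dict1 dict2 k).map Prod.fst)
        (ks.flatMap fun k => (grp dict1 dict2 k).map Prod.fst) :=
      List.disjoint_of_nodup_append hnd
    rw [ih _ ?_ ?_]
    · rw [hitems, List.append_assoc]
    · intro k' hk' p hp
      rw [PySem.Dict.contains_eq_decide_mem_keys, hkeys, decide_eq_false]
      simp only [List.mem_append]
      rintro (hmem | hmem)
      · have := hfresh k' (by simp [hk']) p hp
        rw [PySem.Dict.contains_eq_decide_mem_keys, decide_eq_false_iff_not] at this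
        exact this hmem
      · exact hdisj hmem (List.mem_flatMap.2 ⟨k', hk', List.mem_map_of_mem hp⟩)
    · exact hnd.of_append_right

-- canonical sorted key list
def skeys (dict1 dict2 : List (String × String)) : List String :=
  PySem.List.sorted (PySem.Set.ofList (dict1.map Prod.fst ++ dict2.map Prod.fst)) (fun k => k) false

theorem skeys_pairwise (dict1 dict2 : List (String × String)) :
    (skeys dict1 dict2).Pairwise (· < ·) :=
  PySem.List.sorted_ofList_pairwise_lt _

theorem skeys_nodup (dict1 dict2 : List (String × String)) : (skeys dict1 dict2).Nodup :=
  (skeys_pairwise dict1 dict2).imp ne_of_lt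

theorem mem_skeys (dict1 dict2 : List (String × String)) (k : String) :
    k ∈ skeys dict1 dict2 ↔ k ∈ dict1.map Prod.fst ∨ k ∈ dict2.map Prod.fst := by
  unfold skeys
  rw [PySem.List.mem_sorted, PySem.Set.mem_ofList, List.mem_append]

theorem stepA_eq (dict1 dict2 : List (String × String)) (nd : PySem.Dict String String)
    (key : String) :
    (if (PySem.Dict.mk dict1).contains key && (PySem.Dict.mk dict2).contains key then
      if (PySem.Dict.mk dict1).getD key "" == (PySem.Dict.mk dict2).getD key "" then
        nd.insert (pyStrAdd "   " key) ((PySem.Dict.mk dict1).getD key "")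
      else
        (nd.insert (pyStrAdd " - " key) ((PySem.Dict.mk dict1).getD key "")).insert
          (pyStrAdd " + " key) ((PySem.Dict.mk dict2).getD key "")
    else if (PySem.Dict.mk dict1).contains key || (PySem.Dict.mk dict2).contains key then
      if (PySem.Dict.mk dict1).contains key then
        nd.insert (pyStrAdd " - " key) ((PySem.Dict.mk dict1).getD key "")
      else if (PySem.Dict.mk dict2).contains key then
        nd.insert (pyStrAdd " + " key) ((PySem.Dict.mk dict2).getD key "")
      else nd
    else nd)
    = (grp dict1 dict2 key).foldl (fun d p => d.insert p.1 p.2) nd := by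
  by_cases h1 : key ∈ dict1.map Prod.fst <;> by_cases h2 : key ∈ dict2.map Prod.fst <;>
    by_cases hv : (PySem.Dict.mk dict1).getD key "" == (PySem.Dict.mk dict2).getD key "" <;>
    simp [grp, PySem.Dict.contains_eq_decide_mem_keys, PySem.Dict.keys_mk, h1, h2, hv]

theorem A_eq_flat (dict1 dict2 : List (String × String)) :
    get_diff_dict dict1 dict2 = (skeys dict1 dict2).flatMap (grp dict1 dict2) := by
  unfold get_diff_dict
  simp only
  have hsort : PySem.List.sorted
      (PySem.Set.union (PySem.Set.ofList ((PySem.Dict.mk dict1).keys))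
        (PySem.Set.ofList ((PySem.Dict.mk dict2).keys))) (fun k => k) false
      = skeys dict1 dict2 := by
    unfold skeys
    apply PySem.List.sorted_eq_sorted_of_perm _ _ _ (fun a b h => h)
    rw [List.perm_ext_iff_of_nodup
      (PySem.Set.nodup_union _ _ (PySem.Set.nodup_ofList _)) (PySem.Set.nodup_ofList _)]
    intro a
    simp [PySem.Set.mem_union, PySem.Set.mem_ofList, PySem.Dict.keys_mk]
  rw [hsort,
    PySem.List.foldl_congr_mem (skeys dict1 dict2) _
      (fun nd key => (grp dict1 dict2 key).foldl (fun d p => d.insert p.1 p.2) nd) _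
      (fun acc x _ => stepA_eq dict1 dict2 acc x),
    items_foldA dict1 dict2 _ _ (fun k _ p _ => PySem.Dict.contains_empty _)
      (nodup_flat_grp dict1 dict2 _ (skeys_nodup dict1 dict2))]
  simp [PySem.Dict.empty]

theorem B_eq_flat (dict1 dict2 : List (String × String)) :
    get_diff_dict_alt dict1 dict2 = (skeys dict1 dict2).flatMap (grp dict1 dict2) := by
  unfold get_diff_dict_alt
  simp only
  rw [PySem.List.foldl_append_singleton_eq_map, PySem.List.foldl_append_singleton_eq_map,
    PySem.List.foldl_append_singleton_eq_map]
  have hrem : ∀ k ∈ PySem.Set.diff (PySem.Set.ofList ((PySem.Dict.mk dict1).keys))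
      (PySem.Set.ofList ((PySem.Dict.mk dict2).keys)),
      k ∈ dict1.map Prod.fst ∧ k ∉ dict2.map Prod.fst := by
    intro k hk
    simpa [PySem.Set.mem_diff, PySem.Set.mem_ofList, PySem.Dict.keys_mk] using hk
  have hadd : ∀ k ∈ PySem.Set.diff (PySem.Set.ofList ((PySem.Dict.mk dict2).keys))
      (PySem.Set.ofList ((PySem.Dict.mk dict1).keys)),
      k ∈ dict2.map Prod.fst ∧ k ∉ dict1.map Prod.fst := by
    intro k hk
    simpa [PySem.Set.mem_diff, PySem.Set.mem_ofList, PySem.Dict.keys_mk] using hk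
  have hcom : ∀ k ∈ PySem.Set.inter (PySem.Set.ofList ((PySem.Dict.mk dict1).keys))
      (PySem.Set.ofList ((PySem.Dict.mk dict2).keys)),
      k ∈ dict1.map Prod.fst ∧ k ∈ dict2.map Prod.fst := by
    intro k hk
    simpa [PySem.Set.mem_inter, PySem.Set.mem_ofList, PySem.Dict.keys_mk] using hk
  have e1 := List.map_congr_left (l := PySem.Set.diff (PySem.Set.ofList ((PySem.Dict.mk dict1).keys))
      (PySem.Set.ofList ((PySem.Dict.mk dict2).keys)))
    (f := fun key => (key, [(pyStrAdd " - " key, (PySem.Dict.mk dict1).getD key "")]))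
    (g := fun k => (k, grp dict1 dict2 k))
    (fun k hk => by obtain ⟨h1, h2⟩ := hrem k hk; simp [grp, h1, h2])
  have e2 := List.map_congr_left (l := PySem.Set.diff (PySem.Set.ofList ((PySem.Dict.mk dict2).keys))
      (PySem.Set.ofList ((PySem.Dict.mk dict1).keys)))
    (f := fun key => (key, [(pyStrAdd " + " key, (PySem.Dict.mk dict2).getD key "")]))
    (g := fun k => (k, grp dict1 dict2 k))
    (fun k hk => by obtain ⟨h1, h2⟩ := hadd k hk; simp [grp, h1, h2])
  have e3 := List.map_congr_left (l := PySem.Set.inter (PySem.Set.ofList ((PySem.Dict.mk dict1).keys))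
      (PySem.Set.ofList ((PySem.Dict.mk dict2).keys)))
    (f := fun key =>
      if (PySem.Dict.mk dict1).getD key "" == (PySem.Dict.mk dict2).getD key "" then
        (key, [(pyStrAdd "   " key, (PySem.Dict.mk dict1).getD key "")])
      else
        (key, [(pyStrAdd " - " key, (PySem.Dict.mk dict1).getD key ""),
               (pyStrAdd " + " key, (PySem.Dict.mk dict2).getD key "")]))
    (g := fun k => (k, grp dict1 dict2 k))
    (fun k hk => by
      obtain ⟨h1, h2⟩ := hcom k hk
      simp only [grp, h1, h2, if_true]
      split_ifs <;> rfl)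
  rw [e1, e2, e3, List.nil_append, ← List.map_append, ← List.map_append]
  have hnod : (PySem.Set.diff (PySem.Set.ofList ((PySem.Dict.mk dict1).keys))
        (PySem.Set.ofList ((PySem.Dict.mk dict2).keys)) ++
      PySem.Set.diff (PySem.Set.ofList ((PySem.Dict.mk dict2).keys))
        (PySem.Set.ofList ((PySem.Dict.mk dict1).keys)) ++
      PySem.Set.inter (PySem.Set.ofList ((PySem.Dict.mk dict1).keys))
        (PySem.Set.ofList ((PySem.Dict.mk dict2).keys))).Nodup := by
    rw [List.nodup_append, List.nodup_append]
    refine ⟨⟨PySem.Set.nodup_diff _ _ (PySem.Set.nodup_ofList _),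
      PySem.Set.nodup_diff _ _ (PySem.Set.nodup_ofList _), ?_⟩,
      PySem.Set.nodup_inter _ _ (PySem.Set.nodup_ofList _), ?_⟩
    · rintro x hx y hy rfl
      exact (hrem x hx).2 (hadd x hy).1
    · rintro x hx y hy rfl
      rcases List.mem_append.1 hx with hx' | hx'
      · exact (hrem x hx').2 (hcom x hy).2
      · exact (hadd x hx').2 (hcom x hy).1
  have hp : (skeys dict1 dict2).Perm
      (PySem.Set.diff (PySem.Set.ofList ((PySem.Dict.mk dict1).keys))
        (PySem.Set.ofList ((PySem.Dict.mk dict2).keys)) ++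
      PySem.Set.diff (PySem.Set.ofList ((PySem.Dict.mk dict2).keys))
        (PySem.Set.ofList ((PySem.Dict.mk dict1).keys)) ++
      PySem.Set.inter (PySem.Set.ofList ((PySem.Dict.mk dict1).keys))
        (PySem.Set.ofList ((PySem.Dict.mk dict2).keys))) := by
    rw [List.perm_ext_iff_of_nodup (skeys_nodup dict1 dict2) hnod]
    intro x
    simp only [mem_skeys, List.mem_append, PySem.Set.mem_diff, PySem.Set.mem_inter,
      PySem.Set.mem_ofList, PySem.Dict.keys_mk]
    tauto
  have hsorted : PySem.List.sorted
      ((PySem.Set.diff (PySem.Set.ofList ((PySem.Dict.mk dict1).keys))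
          (PySem.Set.ofList ((PySem.Dict.mk dict2).keys)) ++
        PySem.Set.diff (PySem.Set.ofList ((PySem.Dict.mk dict2).keys))
          (PySem.Set.ofList ((PySem.Dict.mk dict1).keys)) ++
        PySem.Set.inter (PySem.Set.ofList ((PySem.Dict.mk dict1).keys))
          (PySem.Set.ofList ((PySem.Dict.mk dict2).keys))).map
        (fun k => (k, grp dict1 dict2 k)))
      (fun e => e.1) false
      = (skeys dict1 dict2).map (fun k => (k, grp dict1 dict2 k)) := by
    apply PySem.List.sorted_eq_of_perm_of_pairwise_lt
    · exact hp.map _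
    · exact (List.pairwise_map).mpr (skeys_pairwise dict1 dict2)
  rw [hsorted, ← List.foldl_flatMap, List.flatMap_map]
  have hbeta : (fun a => ((a, grp dict1 dict2 a)).2) = grp dict1 dict2 := rfl
  rw [hbeta]
  rw [PySem.Dict.items_foldl_insert_fresh _ Prod.fst Prod.snd _
    (fun a _ => PySem.Dict.contains_empty _) ?_]
  · simp [PySem.Dict.empty]
  · rw [List.map_flatMap]
    exact nodup_flat_grp dict1 dict2 _ (skeys_nodup dict1 dict2)

-- ===== VERDICT (by name: the statement is the Claim_ definition above) =====
theorem get_diff_dict_spec : Claim_equal_get_diff_dict := by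
  intro dict1 dict2 _
  unfold Spec_get_diff_dict
  rw [A_eq_flat, B_eq_flat]
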